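-- pv_equiv track=rewrite | github.com/ShuZhe-yanr/EA_collection | hro/function.py | exp_schwefel
-- ===== SOURCE A (Python) =====
-- def exp_schwefel(xs):
--     d = len(xs)
--     result = 0
--     for i in range(d):
--         temp = 0
--         for j in range(i):
--             temp += xs[j]
--         result += temp ** 2
--     return result
-- ===== SOURCE B (Python) =====
-- def exp_schwefel(xs):
--     # one pass: maintain the running prefix sum and add its square each step
--     result = 0
--     s = 0
--     for x in xs:
--         result += s * s
--         s += x
--     return result
-- ===== Notes on version B (the rewrite author's own statement) =====
-- stated objective: faster
-- what changed: replaces the nested loop recomputing each prefix sum from scratch with a single pass that maintains a running prefix sum and accumulates its square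
import Mathlib
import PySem

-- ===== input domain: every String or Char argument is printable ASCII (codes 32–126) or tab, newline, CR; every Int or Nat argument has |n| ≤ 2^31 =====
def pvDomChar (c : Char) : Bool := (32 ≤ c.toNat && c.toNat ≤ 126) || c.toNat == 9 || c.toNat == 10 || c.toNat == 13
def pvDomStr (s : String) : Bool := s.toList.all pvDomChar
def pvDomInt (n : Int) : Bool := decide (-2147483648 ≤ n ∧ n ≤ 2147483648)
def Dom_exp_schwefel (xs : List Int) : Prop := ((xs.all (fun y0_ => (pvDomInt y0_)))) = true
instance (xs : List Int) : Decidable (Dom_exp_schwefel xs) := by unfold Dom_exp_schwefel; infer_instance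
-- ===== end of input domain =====

-- B replaces A's quadratic prefix-sum recomputation with one pass maintaining a running prefix sum (objective: faster).

-- ===== PORT A =====
def exp_schwefel (xs : List Int) : Int :=
  (PySem.List.pyRange 0 (PySem.List.len xs) 1).foldl
    (fun result i =>
      result + ((PySem.List.pyRange 0 i 1).foldl
        (fun temp j => temp + PySem.List.pyGetD xs j 0) 0) ^ 2) 0

-- ===== PORT B =====
def exp_schwefel_alt (xs : List Int) : Int :=
  (xs.foldl (fun (st : Int × Int) x => (st.1 + st.2 * st.2, st.2 + x)) ((0 : Int), (0 : Int))).1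

-- ===== PRECONDITION & SPEC =====
def Spec_exp_schwefel (xs : List Int) (out : Int) : Prop := out = exp_schwefel_alt xs
instance (xs : List Int) (out : Int) : Decidable (Spec_exp_schwefel xs out) := by unfold Spec_exp_schwefel; infer_instance

-- ===== CLAIM (what is proved, stated in full; the proofs are below) =====
def Claim_equal_exp_schwefel : Prop := ∀ (xs : List Int), Dom_exp_schwefel xs → Spec_exp_schwefel xs (exp_schwefel xs)

-- ===== LEMMAS AND PROOFS =====

-- fold congruence specialised (pointwise-equal step functions give equal folds)
theorem foldl_congr_pt {α β : Type} (l : List β) (f g : α → β → α) (init : α)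
    (h : ∀ x ∈ l, ∀ acc, f acc x = g acc x) : l.foldl f init = l.foldl g init := by
  induction l generalizing init with
  | nil => rfl
  | cons y t ih =>
    rw [List.foldl_cons, List.foldl_cons, h y (List.mem_cons_self) init]
    exact ih _ (fun x hx acc => h x (List.mem_cons_of_mem y hx) acc)

-- A's inner loop computes the sum of the first k elements.
theorem inner_eq (xs : List Int) (k : Nat) (hk : k ≤ xs.length) :
    (PySem.List.pyRange 0 (k : Nat) 1).foldl (fun temp j => temp + PySem.List.pyGetD xs j 0) 0
      = (xs.take k).sum := by
  induction k with
  | zero => simp [PySem.List.pyRange_one_eq_nil]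
  | succ k ih =>
    have hklt : k < xs.length := by omega
    have h1 : ((k + 1 : Nat) : Int) = (k : Int) + 1 := by push_cast; ring
    rw [h1, PySem.List.pyRange_one_succ_right (by positivity), List.foldl_append,
      ih (by omega)]
    simp only [List.foldl_cons, List.foldl_nil]
    rw [PySem.List.pyGetD_natCast, List.getD_eq_getElem xs 0 hklt,
      List.sum_take_succ xs k hklt]

-- A equals the sum of squares of the prefix sums of lengths 0 .. d-1.
theorem A_eq (xs : List Int) :
    exp_schwefel xs
      = ((List.range xs.length).map (fun k => ((xs.take k).sum) * ((xs.take k).sum))).sum := by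
  unfold exp_schwefel
  rw [show PySem.List.len xs = (xs.length : Int) from by simp,
    PySem.List.pyRange_zero_natCast, List.foldl_map]
  rw [foldl_congr_pt (List.range xs.length) _
    (fun r k => r + ((xs.take k).sum) * ((xs.take k).sum)) 0
    (by
      intro k hk r
      rw [inner_eq xs k (Nat.le_of_lt (List.mem_range.mp hk))]
      ring)]
  rw [PySem.List.foldl_add]
  simp

-- loop invariant of B's single pass
theorem B_inv (xs : List Int) : ∀ (acc s : Int),
    (xs.foldl (fun (st : Int × Int) x => (st.1 + st.2 * st.2, st.2 + x)) (acc, s)).1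
      = acc + ((List.range xs.length).map (fun k => (s + (xs.take k).sum) * (s + (xs.take k).sum))).sum := by
  induction xs with
  | nil => intro acc s; simp
  | cons x ys ih =>
    intro acc s
    rw [List.foldl_cons, ih]
    have hmap : (List.range ys.length).map
        (fun k => (s + x + (ys.take k).sum) * (s + x + (ys.take k).sum))
        = (List.range ys.length).map
          ((fun k => (s + ((x :: ys).take k).sum) * (s + ((x :: ys).take k).sum)) ∘ Nat.succ) := by
      apply List.map_congr_left
      intro k _
      simp only [Function.comp, List.take_succ_cons, List.sum_cons]
      ring
    rw [hmap, show (x :: ys).length = ys.length + 1 from rfl,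
      List.range_succ_eq_map, List.map_cons, List.map_map, List.sum_cons]
    simp
    ring

-- ===== VERDICT (by name: the statement is the Claim_ definition above) =====
theorem exp_schwefel_spec : Claim_equal_exp_schwefel := by
  intro xs _
  unfold Spec_exp_schwefel exp_schwefel_alt
  rw [A_eq, B_inv xs 0 0]
  simp
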